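-- pv_equiv track=rewrite | github.com/sauravujjain/markermind | backend/backend/services/gpu_nesting_runner.py | _build_pieces_list
-- ===== SOURCE A (Python) =====
-- from typing import Dict, List, Tuple, Callable, Optional
--
-- def _build_pieces_list(ratio: Dict[str, int], pieces_by_size: Dict) -> List[Dict]:
--     """Expand a ratio dict into a flat list of piece dicts."""
--     pieces_list = []
--     for size, count in ratio.items():
--         if count <= 0 or size not in pieces_by_size:
--             continue
--         for _ in range(count):
--             for p in pieces_by_size[size]:
--                 for _ in range(p['demand']):
--                     pieces_list.append(p)
--     return pieces_list
-- ===== SOURCE B (Python) =====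
-- def _build_pieces_list(ratio, pieces_by_size):
--     """Expand a ratio dict into a flat list of piece dicts.
--
--     Explicit work-stack machine: a single while loop pops tasks and either
--     emits a piece or pushes decremented sub-tasks (no nested loops over counts).
--     """
--     pieces_list = []
--     # ('rep', size, n): emit the expansion of `size` n more times
--     # ('piece', p, n): emit piece p n more times
--     stack = [('rep', size, count) for size, count in reversed(list(ratio.items()))]
--     while stack:
--         kind, x, n = stack.pop()
--         if kind == 'rep':
--             if n <= 0 or x not in pieces_by_size:
--                 continue
--             stack.append(('rep', x, n - 1))
--             for p in reversed(pieces_by_size[x]):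
--                 stack.append(('piece', p, p['demand']))
--         else:
--             if n <= 0:
--                 continue
--             pieces_list.append(x)
--             stack.append(('piece', x, n - 1))
--     return pieces_list
-- ===== Notes on version B (the rewrite author's own statement) =====
-- stated objective: alternative
-- what changed: Replaces A's triply nested replication loops by an explicit LIFO work-stack machine: a single while loop pops rep/piece tasks with decrementing counters and pushes sub-tasks.
import Mathlib
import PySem

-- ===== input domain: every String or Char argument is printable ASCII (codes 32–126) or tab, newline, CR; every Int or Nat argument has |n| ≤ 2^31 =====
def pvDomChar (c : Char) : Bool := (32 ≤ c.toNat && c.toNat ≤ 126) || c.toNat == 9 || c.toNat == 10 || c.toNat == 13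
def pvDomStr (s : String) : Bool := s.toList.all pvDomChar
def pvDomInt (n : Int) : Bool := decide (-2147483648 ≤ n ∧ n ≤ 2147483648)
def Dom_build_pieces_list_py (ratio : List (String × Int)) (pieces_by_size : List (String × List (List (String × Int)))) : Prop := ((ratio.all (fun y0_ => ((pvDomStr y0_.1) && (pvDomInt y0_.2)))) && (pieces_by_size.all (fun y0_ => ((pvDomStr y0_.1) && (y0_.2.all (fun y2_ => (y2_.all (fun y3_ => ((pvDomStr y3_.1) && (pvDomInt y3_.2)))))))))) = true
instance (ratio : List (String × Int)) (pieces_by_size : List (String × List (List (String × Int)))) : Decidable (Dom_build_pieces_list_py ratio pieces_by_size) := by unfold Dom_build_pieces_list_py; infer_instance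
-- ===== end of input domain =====

-- B replaces A's nested replication loops by an explicit LIFO work-stack machine
-- (one while loop popping rep/piece tasks with decrementing counters); alternative
-- decomposition, same output.

-- ===== PORT A =====
-- dicts are association lists; d[k] / 'k in d' use first-match lookup (List.lookup)
def build_pieces_list_py (ratio : List (String × Int)) (pieces_by_size : List (String × List (List (String × Int)))) : List (List (String × Int)) :=
  ratio.foldl (fun acc sc =>
    if sc.2 ≤ 0 ∨ (List.lookup sc.1 pieces_by_size).isNone then acc
    else
      (PySem.List.pyRange 0 sc.2 1).foldl (fun acc2 _ =>
        ((List.lookup sc.1 pieces_by_size).getD []).foldl (fun acc3 p =>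
          (PySem.List.pyRange 0 ((List.lookup "demand" p).getD 0) 1).foldl
            (fun acc4 _ => acc4 ++ [p]) acc3) acc2) acc) []

-- ===== PORT B =====
-- work-stack tasks: rep size n ("emit size's expansion n more times"),
-- piece p n ("emit p n more times"); Lean list head = top of Python's stack,
-- so Python's reversed() pushes become in-order prepends here.
inductive PvTask : Type
  | rep : String → Int → PvTask
  | piece : List (String × Int) → Int → PvTask
deriving DecidableEq, Repr

def pvBlockTasks (pieces_by_size : List (String × List (List (String × Int)))) (s : String) : List PvTask :=
  ((List.lookup s pieces_by_size).getD []).map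
    (fun p => PvTask.piece p ((List.lookup "demand" p).getD 0))

-- termination measure for the work-stack loop
def pvWsum (pieces_by_size : List (String × List (List (String × Int)))) (s : String) : Nat :=
  (((List.lookup s pieces_by_size).getD []).map
    (fun p => ((List.lookup "demand" p).getD 0).toNat + 1)).sum

def pvWeight (pieces_by_size : List (String × List (List (String × Int)))) : PvTask → Nat
  | PvTask.piece _ d => d.toNat + 1
  | PvTask.rep s c => c.toNat * (pvWsum pieces_by_size s + 1) + 1

theorem pvWeight_blockTasks (pbs : List (String × List (List (String × Int)))) (s : String) :
    ((pvBlockTasks pbs s).map (pvWeight pbs)).sum = pvWsum pbs s := by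
  simp [pvBlockTasks, pvWsum, pvWeight, List.map_map, Function.comp_def]

def pvRun (pieces_by_size : List (String × List (List (String × Int))))
    (stack : List PvTask) (acc : List (List (String × Int))) : List (List (String × Int)) :=
  match stack with
  | [] => acc
  | PvTask.piece p d :: rest =>
      if d ≤ 0 then pvRun pieces_by_size rest acc
      else pvRun pieces_by_size (PvTask.piece p (d - 1) :: rest) (acc ++ [p])
  | PvTask.rep s c :: rest =>
      if c ≤ 0 ∨ (List.lookup s pieces_by_size).isNone then pvRun pieces_by_size rest acc
      else pvRun pieces_by_size
        (pvBlockTasks pieces_by_size s ++ PvTask.rep s (c - 1) :: rest) acc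
termination_by (stack.map (pvWeight pieces_by_size)).sum
decreasing_by
  · simp [pvWeight]
  · simp only [List.map_cons, List.sum_cons, pvWeight]
    have : (d - 1).toNat < d.toNat := by omega
    omega
  · simp [pvWeight]
  · simp only [List.map_append, List.sum_append, List.map_cons, List.sum_cons,
      pvWeight_blockTasks, pvWeight]
    have hc : ¬ c ≤ 0 := by tauto
    have : (c - 1).toNat + 1 = c.toNat := by omega
    nlinarith [this]

def build_pieces_list_py_alt (ratio : List (String × Int)) (pieces_by_size : List (String × List (List (String × Int)))) : List (List (String × Int)) :=
  pvRun pieces_by_size (ratio.map (fun sc => PvTask.rep sc.1 sc.2)) []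

-- ===== PRECONDITION & SPEC =====
-- Pre_ excludes exactly the inputs on which both Pythons raise KeyError: a piece dict
-- reached by the expansion (its size present in pieces_by_size and requested with
-- count > 0) that lacks the 'demand' key.
def Pre_build_pieces_list_py (ratio : List (String × Int)) (pieces_by_size : List (String × List (List (String × Int)))) : Prop :=
  ∀ sc ∈ ratio, 0 < sc.2 →
    ∀ p ∈ (List.lookup sc.1 pieces_by_size).getD [], (List.lookup "demand" p).isSome = true
instance (ratio : List (String × Int)) (pieces_by_size : List (String × List (List (String × Int)))) : Decidable (Pre_build_pieces_list_py ratio pieces_by_size) := by unfold Pre_build_pieces_list_py; infer_instance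

def pvWitness_build_pieces_list_py : (List (String × Int)) × (List (String × List (List (String × Int)))) :=
  ([("a", 2), ("b", 0)], [("a", [[("demand", 2), ("w", 5)], [("demand", 0)]])])

def Spec_build_pieces_list_py (ratio : List (String × Int)) (pieces_by_size : List (String × List (List (String × Int)))) (out : List (List (String × Int))) : Prop := out = build_pieces_list_py_alt ratio pieces_by_size
instance (ratio : List (String × Int)) (pieces_by_size : List (String × List (List (String × Int)))) (out : List (List (String × Int))) : Decidable (Spec_build_pieces_list_py ratio pieces_by_size out) := by unfold Spec_build_pieces_list_py; infer_instance

-- ===== CLAIM (what is proved, stated in full; the proofs are below) =====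
def Claim_equal_build_pieces_list_py : Prop := ∀ (ratio : List (String × Int)) (pieces_by_size : List (String × List (List (String × Int)))), Dom_build_pieces_list_py ratio pieces_by_size → Pre_build_pieces_list_py ratio pieces_by_size → Spec_build_pieces_list_py ratio pieces_by_size (build_pieces_list_py ratio pieces_by_size)

-- ===== LEMMAS AND PROOFS =====
-- one size's fully expanded block
def pvBlock (pbs : List (String × List (List (String × Int)))) (s : String) : List (List (String × Int)) :=
  ((List.lookup s pbs).getD []).flatMap
    (fun p => List.replicate ((List.lookup "demand" p).getD 0).toNat p)

-- output contributed by one task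
def pvDenot (pbs : List (String × List (List (String × Int)))) : PvTask → List (List (String × Int))
  | PvTask.piece p d => List.replicate d.toNat p
  | PvTask.rep s c =>
      if c ≤ 0 ∨ (List.lookup s pbs).isNone then []
      else (List.replicate c.toNat (pvBlock pbs s)).flatten

theorem pvDenot_blockTasks (pbs : List (String × List (List (String × Int)))) (s : String) :
    (pvBlockTasks pbs s).flatMap (pvDenot pbs) = pvBlock pbs s := by
  simp [pvBlockTasks, pvBlock, List.flatMap_map, pvDenot]

theorem pvRun_eq (pbs : List (String × List (List (String × Int))))
    (stack : List PvTask) (acc : List (List (String × Int))) :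
    pvRun pbs stack acc = acc ++ stack.flatMap (pvDenot pbs) := by
  fun_induction pvRun pbs stack acc with
  | case1 acc => simp
  | case2 acc p d rest hd ih =>
      simp [ih, pvDenot, show d.toNat = 0 by omega]
  | case3 acc p d rest hd ih =>
      rw [ih]
      have hdt : d.toNat = (d - 1).toNat + 1 := by omega
      simp only [List.flatMap_cons, pvDenot, hdt, List.replicate_succ]
      simp
  | case4 acc s c rest hc ih =>
      rw [ih]
      simp only [List.flatMap_cons, pvDenot, if_pos hc]
      simp
  | case5 acc s c rest hc ih =>
      push Not at hc
      rw [ih]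
      have hc' : ¬ (c ≤ 0 ∨ (List.lookup s pbs).isNone = true) := by
        rw [not_or]; exact ⟨by omega, hc.2⟩
      have hden : pvDenot pbs (PvTask.rep s (c - 1))
          = (List.replicate (c - 1).toNat (pvBlock pbs s)).flatten := by
        simp only [pvDenot]
        split_ifs with h
        · rcases h with h | h
          · simp [show (c - 1).toNat = 0 by omega]
          · exact absurd h hc.2
        · rfl
      have hct : c.toNat = (c - 1).toNat + 1 := by omega
      simp only [List.flatMap_append, List.flatMap_cons, pvDenot_blockTasks, hden]
      simp only [pvDenot, if_neg hc', hct, List.replicate_succ, List.flatten_cons]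
      simp

-- A-side loop lemmas
theorem pv_fold_app {α β : Type} (l : List β) (p : α) (acc : List α) :
    l.foldl (fun a _ => a ++ [p]) acc = acc ++ List.replicate l.length p := by
  induction l generalizing acc with
  | nil => simp
  | cons x xs ih => simp [List.foldl, ih, List.replicate_succ]

theorem pv_fold_ps (ps : List (List (String × Int))) (acc : List (List (String × Int))) :
    ps.foldl (fun a p =>
        (PySem.List.pyRange 0 ((List.lookup "demand" p).getD 0) 1).foldl
          (fun a2 _ => a2 ++ [p]) a) acc
      = acc ++ ps.flatMap (fun p => List.replicate ((List.lookup "demand" p).getD 0).toNat p) := by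
  induction ps generalizing acc with
  | nil => simp
  | cons q qs ih =>
      simp only [List.foldl, List.flatMap_cons]
      rw [pv_fold_app, ih, PySem.List.length_pyRange_one, List.append_assoc]
      congr 2
      · congr 1
        omega

theorem pv_fold_rep {α β : Type} (l : List β) (base acc : List α) :
    l.foldl (fun a _ => a ++ base) acc = acc ++ (List.replicate l.length base).flatten := by
  induction l generalizing acc with
  | nil => simp
  | cons x xs ih => simp [List.foldl, ih, List.replicate_succ]

-- A's fold computes the concatenation of the per-entry denotations
theorem pv_A_eq (pbs : List (String × List (List (String × Int)))) (ratio : List (String × Int))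
    (acc : List (List (String × Int))) :
    ratio.foldl (fun acc sc =>
      if sc.2 ≤ 0 ∨ (List.lookup sc.1 pbs).isNone then acc
      else
        (PySem.List.pyRange 0 sc.2 1).foldl (fun acc2 _ =>
          ((List.lookup sc.1 pbs).getD []).foldl (fun acc3 p =>
            (PySem.List.pyRange 0 ((List.lookup "demand" p).getD 0) 1).foldl
              (fun acc4 _ => acc4 ++ [p]) acc3) acc2) acc) acc
    = acc ++ ratio.flatMap (fun sc => pvDenot pbs (PvTask.rep sc.1 sc.2)) := by
  induction ratio generalizing acc with
  | nil => simp
  | cons sc rest ih =>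
      simp only [List.foldl, List.flatMap_cons]
      rw [ih]
      by_cases h : sc.2 ≤ 0 ∨ (List.lookup sc.1 pbs).isNone
      · rw [if_pos h]
        simp only [pvDenot, if_pos h]
        simp
      · rw [if_neg h]
        have hfun : (fun (acc2 : List (List (String × Int))) (_ : Int) =>
            ((List.lookup sc.1 pbs).getD []).foldl (fun acc3 p =>
              (PySem.List.pyRange 0 ((List.lookup "demand" p).getD 0) 1).foldl
                (fun acc4 _ => acc4 ++ [p]) acc3) acc2)
            = (fun acc2 _ => acc2 ++ pvBlock pbs sc.1) :=
          funext fun a2 => funext fun _ => pv_fold_ps _ a2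
        rw [hfun, pv_fold_rep, PySem.List.length_pyRange_one, List.append_assoc]
        congr 2
        simp only [pvDenot, if_neg h]
        congr 2
        omega

-- ===== VERDICT (by name: the statement is the Claim_ definition above) =====
theorem build_pieces_list_py_spec : Claim_equal_build_pieces_list_py := by
  intro ratio pbs _ _
  unfold Spec_build_pieces_list_py build_pieces_list_py build_pieces_list_py_alt
  rw [pv_A_eq, pvRun_eq]
  simp [List.flatMap_map]
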